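-- pv_equiv track=rewrite | github.com/prakash1621/ma-oracle-rag | src/knowledge_graph/export.py | _node_type
-- ===== SOURCE A (Python) =====
-- def _node_type(labels: list[str]) -> str:
--     if not labels:
--         return "Node"
--     # Keep stable display order for known labels.
--     for candidate in (
--         "Company",
--         "Subsidiary",
--         "BoardMember",
--         "Filing",
--         "Patent",
--         "RiskFactor",
--         "Litigation",
--     ):
--         if candidate in labels:
--             return candidate
--     return labels[0]
-- ===== SOURCE B (Python) =====
-- _RANK = {
--     "Company": 0,
--     "Subsidiary": 1,
--     "BoardMember": 2,
--     "Filing": 3,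
--     "Patent": 4,
--     "RiskFactor": 5,
--     "Litigation": 6,
-- }
--
--
-- def _node_type(labels: list[str]) -> str:
--     if not labels:
--         return "Node"
--     best = None
--     best_rank = 7
--     for lab in labels:
--         r = _RANK.get(lab, 7)
--         if r < best_rank:
--             best_rank = r
--             best = lab
--     if best_rank < 7:
--         return best
--     return labels[0]
-- ===== Notes on version B (the rewrite author's own statement) =====
-- stated objective: alternative
-- what changed: Inverted traversal: instead of scanning the 7 candidates in priority order with an 'in labels' membership test for each, B makes a single pass over labels tracking the label of minimum priority rank via a precomputed rank table, returning it (or labels[0] if no known label occurs).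
import Mathlib
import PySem

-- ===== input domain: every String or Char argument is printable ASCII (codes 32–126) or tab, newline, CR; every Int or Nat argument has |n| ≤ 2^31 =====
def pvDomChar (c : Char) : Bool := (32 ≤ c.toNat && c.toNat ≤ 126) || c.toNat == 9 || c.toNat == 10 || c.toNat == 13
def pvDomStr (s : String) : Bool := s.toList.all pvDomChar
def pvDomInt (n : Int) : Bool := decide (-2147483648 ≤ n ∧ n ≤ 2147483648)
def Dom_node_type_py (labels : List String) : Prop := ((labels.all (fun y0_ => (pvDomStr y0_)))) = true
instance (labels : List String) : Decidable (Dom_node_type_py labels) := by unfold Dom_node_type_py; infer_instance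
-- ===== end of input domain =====

-- B replaces A's scan over the 7 candidates (each with an 'in labels' test) by a single pass
-- over labels tracking the minimum-rank known label via a rank table (objective: alternative).

-- ===== PORT A =====
-- the tuple of known labels, in display-priority order
def pvCandsA : List String :=
  ["Company", "Subsidiary", "BoardMember", "Filing", "Patent", "RiskFactor", "Litigation"]

-- the 'for candidate in (...)' loop with its early return
def nodeTypeLoopA (labels : List String) : List String → Option String
  | [] => none
  | c :: cs => if c ∈ labels then some c else nodeTypeLoopA labels cs

def node_type_py (labels : List String) : String :=
  if labels.isEmpty then "Node"
  else
    match nodeTypeLoopA labels pvCandsA with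
    | some c => c
    | none => labels.headD "Node"  -- labels[0]; in range since labels is nonempty here

-- ===== PORT B =====
def pvRankB : PySem.Dict String Int :=
  PySem.Dict.mk
    [("Company", 0), ("Subsidiary", 1), ("BoardMember", 2), ("Filing", 3),
     ("Patent", 4), ("RiskFactor", 5), ("Litigation", 6)]

-- loop body: keep the (rank, label) of the minimum-rank label seen so far
def pvStepB (acc : Int × Option String) (lab : String) : Int × Option String :=
  let r := PySem.Dict.getD pvRankB lab 7
  if r < acc.1 then (r, some lab) else acc

def node_type_py_alt (labels : List String) : String :=
  if labels.isEmpty then "Node"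
  else
    let st := labels.foldl pvStepB (7, none)
    if st.1 < 7 then st.2.getD "Node"
    else labels.headD "Node"  -- labels[0]; in range since labels is nonempty here

-- ===== PRECONDITION & SPEC =====
def Spec_node_type_py (labels : List String) (out : String) : Prop := out = node_type_py_alt labels
instance (labels : List String) (out : String) : Decidable (Spec_node_type_py labels out) := by unfold Spec_node_type_py; infer_instance

-- ===== CLAIM (what is proved, stated in full; the proofs are below) =====
def Claim_equal_node_type_py : Prop := ∀ (labels : List String), Dom_node_type_py labels → Spec_node_type_py labels (node_type_py labels)

-- ===== LEMMAS AND PROOFS =====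

-- every string is one of the 7 ranked labels (with its rank) or has default rank 7
theorem rk_cases (l : String) :
    (l = "Company" ∧ PySem.Dict.getD pvRankB l 7 = 0) ∨
    (l = "Subsidiary" ∧ PySem.Dict.getD pvRankB l 7 = 1) ∨
    (l = "BoardMember" ∧ PySem.Dict.getD pvRankB l 7 = 2) ∨
    (l = "Filing" ∧ PySem.Dict.getD pvRankB l 7 = 3) ∨
    (l = "Patent" ∧ PySem.Dict.getD pvRankB l 7 = 4) ∨
    (l = "RiskFactor" ∧ PySem.Dict.getD pvRankB l 7 = 5) ∨
    (l = "Litigation" ∧ PySem.Dict.getD pvRankB l 7 = 6) ∨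
    PySem.Dict.getD pvRankB l 7 = 7 := by
  by_cases h0 : l = "Company"
  · subst h0; exact Or.inl ⟨rfl, by decide⟩
  by_cases h1 : l = "Subsidiary"
  · subst h1; exact Or.inr (Or.inl ⟨rfl, by decide⟩)
  by_cases h2 : l = "BoardMember"
  · subst h2; exact Or.inr (Or.inr (Or.inl ⟨rfl, by decide⟩))
  by_cases h3 : l = "Filing"
  · subst h3; exact Or.inr (Or.inr (Or.inr (Or.inl ⟨rfl, by decide⟩)))
  by_cases h4 : l = "Patent"
  · subst h4; exact Or.inr (Or.inr (Or.inr (Or.inr (Or.inl ⟨rfl, by decide⟩))))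
  by_cases h5 : l = "RiskFactor"
  · subst h5; exact Or.inr (Or.inr (Or.inr (Or.inr (Or.inr (Or.inl ⟨rfl, by decide⟩)))))
  by_cases h6 : l = "Litigation"
  · subst h6; exact Or.inr (Or.inr (Or.inr (Or.inr (Or.inr (Or.inr (Or.inl ⟨rfl, by decide⟩))))))
  refine Or.inr (Or.inr (Or.inr (Or.inr (Or.inr (Or.inr (Or.inr ?_))))))
  simp [pvRankB, PySem.Dict.getD_eq_get?_getD, PySem.Dict.get?_mk_cons,
        beq_eq_false_iff_ne, Ne.symm h0, Ne.symm h1, Ne.symm h2, Ne.symm h3,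
        Ne.symm h4, Ne.symm h5, Ne.symm h6, PySem.Dict.get?]

-- invariant of B's fold: the rank never increases, it is a lower bound for
-- the ranks of all scanned labels, and the state is either untouched or
-- records a scanned label together with its rank
theorem foldInvB (ls : List String) : ∀ acc : Int × Option String,
    (ls.foldl pvStepB acc).1 ≤ acc.1 ∧
    (∀ l ∈ ls, (ls.foldl pvStepB acc).1 ≤ PySem.Dict.getD pvRankB l 7) ∧
    (ls.foldl pvStepB acc = acc ∨
      ∃ l ∈ ls, (ls.foldl pvStepB acc).2 = some l ∧
        PySem.Dict.getD pvRankB l 7 = (ls.foldl pvStepB acc).1) := by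
  induction ls with
  | nil => intro acc; exact ⟨le_refl _, by simp, Or.inl rfl⟩
  | cons x xs ih =>
    intro acc
    obtain ⟨ihle, ihall, ihst⟩ := ih (pvStepB acc x)
    have hstep : (pvStepB acc x).1 ≤ acc.1 ∧ (pvStepB acc x).1 ≤ PySem.Dict.getD pvRankB x 7 := by
      unfold pvStepB; dsimp only; split_ifs with h <;> constructor <;> omega
    refine ⟨le_trans ihle hstep.1, ?_, ?_⟩
    · intro l hl
      rcases List.mem_cons.mp hl with h | h
      · subst h; exact le_trans ihle hstep.2
      · exact ihall l h
    · rcases ihst with heq | ⟨l, hl, h2, h3⟩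
      · rw [List.foldl_cons, heq]
        unfold pvStepB; dsimp only
        split_ifs with h
        · exact Or.inr ⟨x, List.mem_cons_self , rfl, by simp⟩
        · exact Or.inl rfl
      · exact Or.inr ⟨l, List.mem_cons_of_mem _ hl, h2, h3⟩

-- if the minimum-rank known label in `labels` is `c` (rank m, unique holder of rank m),
-- B's fold ends with rank m and label c
theorem b_inner_eq (labels : List String) (m : Int) (c : String)
    (hmem : c ∈ labels)
    (hrkc : PySem.Dict.getD pvRankB c 7 = m)
    (hm7 : m < 7)
    (hmin : ∀ l ∈ labels, m ≤ PySem.Dict.getD pvRankB l 7)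
    (huniq : ∀ l, PySem.Dict.getD pvRankB l 7 = m → l = c) :
    (labels.foldl pvStepB (7, none)).1 < 7 ∧
    (labels.foldl pvStepB (7, none)).2 = some c := by
  obtain ⟨hle, hall, hst⟩ := foldInvB labels (7, none)
  have hub : (labels.foldl pvStepB (7, none)).1 ≤ m := hrkc ▸ hall c hmem
  rcases hst with heq | ⟨l, hl, h2, h3⟩
  · rw [heq] at hub; simp at hub; omega
  · have hlb : m ≤ (labels.foldl pvStepB (7, none)).1 := h3 ▸ hmin l hl
    have : PySem.Dict.getD pvRankB l 7 = m := by omega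
    rw [h2, huniq l this]
    exact ⟨by omega, rfl⟩

-- if no label is a known one, B's fold keeps rank 7
theorem b_inner_none (labels : List String)
    (h : ∀ l ∈ labels, PySem.Dict.getD pvRankB l 7 = 7) :
    (labels.foldl pvStepB (7, none)).1 = 7 := by
  obtain ⟨hle, _, hst⟩ := foldInvB labels (7, none)
  rcases hst with heq | ⟨l, hl, _, h3⟩
  · rw [heq]
  · rw [← h3, h l hl]

-- ===== VERDICT (by name: the statement is the Claim_ definition above) =====
theorem node_type_py_spec : Claim_equal_node_type_py := by
  intro labels _
  unfold Spec_node_type_py node_type_py node_type_py_alt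
  by_cases hE : labels.isEmpty
  · simp [hE]
  simp only [hE, if_false]
  by_cases h0 : "Company" ∈ labels
  · have hb := b_inner_eq labels 0 "Company" h0 (by decide) (by decide)
      (fun l hl => by rcases rk_cases l with h|h|h|h|h|h|h|h <;> first  | omega | (rw [h.2]; omega) | (rw [h]; omega))
      (fun l hrk => by rcases rk_cases l with h|h|h|h|h|h|h|h <;> first | exact h.1 | omega | (rw [h.2] at hrk; omega) | (rw [h] at hrk; omega))
    simp [nodeTypeLoopA, pvCandsA, h0, hb.1, hb.2]
  by_cases h1 : "Subsidiary" ∈ labels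
  · have hb := b_inner_eq labels 1 "Subsidiary" h1 (by decide) (by decide)
      (fun l hl => by rcases rk_cases l with h|h|h|h|h|h|h|h <;> first | (rw [h.1] at hl; exact absurd hl h0) | omega | (rw [h.2]; omega) | (rw [h]; omega))
      (fun l hrk => by rcases rk_cases l with h|h|h|h|h|h|h|h <;> first | exact h.1 | omega | (rw [h.2] at hrk; omega) | (rw [h] at hrk; omega))
    simp [nodeTypeLoopA, pvCandsA, h0, h1, hb.1, hb.2]
  by_cases h2 : "BoardMember" ∈ labels
  · have hb := b_inner_eq labels 2 "BoardMember" h2 (by decide) (by decide)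
      (fun l hl => by rcases rk_cases l with h|h|h|h|h|h|h|h <;> first | (rw [h.1] at hl; exact absurd hl h0) | (rw [h.1] at hl; exact absurd hl h1) | omega | (rw [h.2]; omega) | (rw [h]; omega))
      (fun l hrk => by rcases rk_cases l with h|h|h|h|h|h|h|h <;> first | exact h.1 | omega | (rw [h.2] at hrk; omega) | (rw [h] at hrk; omega))
    simp [nodeTypeLoopA, pvCandsA, h0, h1, h2, hb.1, hb.2]
  by_cases h3 : "Filing" ∈ labels
  · have hb := b_inner_eq labels 3 "Filing" h3 (by decide) (by decide)
      (fun l hl => by rcases rk_cases l with h|h|h|h|h|h|h|h <;> first | (rw [h.1] at hl; exact absurd hl h0) | (rw [h.1] at hl; exact absurd hl h1) | (rw [h.1] at hl; exact absurd hl h2) | omega | (rw [h.2]; omega) | (rw [h]; omega))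
      (fun l hrk => by rcases rk_cases l with h|h|h|h|h|h|h|h <;> first | exact h.1 | omega | (rw [h.2] at hrk; omega) | (rw [h] at hrk; omega))
    simp [nodeTypeLoopA, pvCandsA, h0, h1, h2, h3, hb.1, hb.2]
  by_cases h4 : "Patent" ∈ labels
  · have hb := b_inner_eq labels 4 "Patent" h4 (by decide) (by decide)
      (fun l hl => by rcases rk_cases l with h|h|h|h|h|h|h|h <;> first | (rw [h.1] at hl; exact absurd hl h0) | (rw [h.1] at hl; exact absurd hl h1) | (rw [h.1] at hl; exact absurd hl h2) | (rw [h.1] at hl; exact absurd hl h3) | omega | (rw [h.2]; omega) | (rw [h]; omega))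
      (fun l hrk => by rcases rk_cases l with h|h|h|h|h|h|h|h <;> first | exact h.1 | omega | (rw [h.2] at hrk; omega) | (rw [h] at hrk; omega))
    simp [nodeTypeLoopA, pvCandsA, h0, h1, h2, h3, h4, hb.1, hb.2]
  by_cases h5 : "RiskFactor" ∈ labels
  · have hb := b_inner_eq labels 5 "RiskFactor" h5 (by decide) (by decide)
      (fun l hl => by rcases rk_cases l with h|h|h|h|h|h|h|h <;> first | (rw [h.1] at hl; exact absurd hl h0) | (rw [h.1] at hl; exact absurd hl h1) | (rw [h.1] at hl; exact absurd hl h2) | (rw [h.1] at hl; exact absurd hl h3) | (rw [h.1] at hl; exact absurd hl h4) | omega | (rw [h.2]; omega) | (rw [h]; omega))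
      (fun l hrk => by rcases rk_cases l with h|h|h|h|h|h|h|h <;> first | exact h.1 | omega | (rw [h.2] at hrk; omega) | (rw [h] at hrk; omega))
    simp [nodeTypeLoopA, pvCandsA, h0, h1, h2, h3, h4, h5, hb.1, hb.2]
  by_cases h6 : "Litigation" ∈ labels
  · have hb := b_inner_eq labels 6 "Litigation" h6 (by decide) (by decide)
      (fun l hl => by rcases rk_cases l with h|h|h|h|h|h|h|h <;> first | (rw [h.1] at hl; exact absurd hl h0) | (rw [h.1] at hl; exact absurd hl h1) | (rw [h.1] at hl; exact absurd hl h2) | (rw [h.1] at hl; exact absurd hl h3) | (rw [h.1] at hl; exact absurd hl h4) | (rw [h.1] at hl; exact absurd hl h5) | omega | (rw [h.2]; omega) | (rw [h]; omega))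
      (fun l hrk => by rcases rk_cases l with h|h|h|h|h|h|h|h <;> first | exact h.1 | omega | (rw [h.2] at hrk; omega) | (rw [h] at hrk; omega))
    simp [nodeTypeLoopA, pvCandsA, h0, h1, h2, h3, h4, h5, h6, hb.1, hb.2]
  · have h7 : (labels.foldl pvStepB (7, none)).1 = 7 := by
      apply b_inner_none
      intro l hl
      rcases rk_cases l with h|h|h|h|h|h|h|h <;> first | (rw [h.1] at hl; exact absurd hl h0) | (rw [h.1] at hl; exact absurd hl h1) | (rw [h.1] at hl; exact absurd hl h2) | (rw [h.1] at hl; exact absurd hl h3) | (rw [h.1] at hl; exact absurd hl h4) | (rw [h.1] at hl; exact absurd hl h5) | (rw [h.1] at hl; exact absurd hl h6) | exact h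
    simp [nodeTypeLoopA, pvCandsA, h0, h1, h2, h3, h4, h5, h6, h7]
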